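-- pv_equiv track=rewrite | github.com/d-rothen/ds-crawler | ds_crawler/zip_utils.py | _detect_root_prefix
-- ===== SOURCE A (Python) =====
-- def _detect_root_prefix(namelist: list[str]) -> str:
--     """Detect a single common root directory prefix from a zip namelist.
--
--     Many zip tools (e.g. macOS Compress) wrap all entries under a
--     top-level directory named after the original folder.  This helper
--     detects that pattern and returns the prefix (e.g. ``"test_kitti/"``)
--     so callers can account for it.
--
--     Returns the prefix string including the trailing ``/``, or ``""``
--     if there is no common single-directory prefix.
--
--     Runs in a single O(n) pass with early exit — negligible overhead
--     even for archives with hundreds of thousands of entries.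
--     """
--     candidate: str | None = None
--     has_nested = False
--
--     for entry in namelist:
--         if entry.startswith("__MACOSX"):
--             continue
--         first, _, rest = entry.partition("/")
--         if candidate is None:
--             candidate = first
--         elif first != candidate:
--             # Two different top-level components → no common prefix.
--             return ""
--         if rest:
--             has_nested = True
--
--     if candidate is None or not has_nested:
--         return ""
--     return candidate + "/"
-- ===== SOURCE B (Python) =====
-- def _lcp(a: str, b: str) -> str:
--     out = []
--     for x, y in zip(a, b):
--         if x != y:
--             break
--         out.append(x)
--     return "".join(out)
--
--
-- def _detect_root_prefix(namelist: list[str]) -> str: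
--     # Character-level longest common prefix of all entries (with "/" appended
--     # so a bare "root" entry still matches "root/..."); the root directory is
--     # the part of that prefix before its first "/".
--     entries = [e + "/" for e in namelist if not e.startswith("__MACOSX")]
--     if not entries:
--         return ""
--     prefix = entries[0]
--     for t in entries[1:]:
--         prefix = _lcp(prefix, t)
--     root, sep, _ = prefix.partition("/")
--     if not sep:
--         return ""
--     # nested iff some original entry has something after "root/"
--     if any(len(t) > len(root) + 2 for t in entries):
--         return root + "/"
--     return ""
-- ===== Notes on version B (the rewrite author's own statement) =====
-- stated objective: alternative
-- what changed: Replaces A's running-candidate/early-return comparison of per-entry first components with a character-level longest-common-prefix fold over all entries (each with '/' appended), then reads the root directory off that prefix up to its first '/'.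
import Mathlib
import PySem

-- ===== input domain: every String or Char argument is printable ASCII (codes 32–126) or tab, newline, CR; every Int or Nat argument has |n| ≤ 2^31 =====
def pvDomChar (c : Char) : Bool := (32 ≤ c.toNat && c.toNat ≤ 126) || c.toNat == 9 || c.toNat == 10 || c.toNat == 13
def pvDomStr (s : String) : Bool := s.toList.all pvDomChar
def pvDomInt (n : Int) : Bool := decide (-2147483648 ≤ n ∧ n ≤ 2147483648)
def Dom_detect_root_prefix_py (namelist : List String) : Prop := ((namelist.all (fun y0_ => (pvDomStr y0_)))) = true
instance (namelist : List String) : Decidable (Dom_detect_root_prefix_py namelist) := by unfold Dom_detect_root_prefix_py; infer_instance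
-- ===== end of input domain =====

-- B replaces A's running-candidate/early-return state machine with a character-level
-- longest-common-prefix fold over all entries (each with "/" appended), reading the root
-- off that prefix up to its first "/"; objective: alternative.

-- shared helper: e.partition("/") — first component and the remainder after the first '/'
-- (exact: Python partition splits at the first occurrence of the separator)
def pvQ (c : Char) : Bool := decide (c ≠ '/')
def pvPartFirst (s : String) : String := String.ofList (s.toList.takeWhile pvQ)
def pvPartRest (s : String) : String := String.ofList ((s.toList.dropWhile pvQ).drop 1)

-- ===== PORT A =====
def pvLoopA (l : List String) (candidate : Option String) (hasNested : Bool) : String :=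
  match l with
  | [] =>
    match candidate with
    | none => ""
    | some c => if hasNested then c ++ "/" else ""
  | e :: t =>
    if PySem.Str.startswith e "__MACOSX" then pvLoopA t candidate hasNested
    else
      match candidate with
      | none => pvLoopA t (some (pvPartFirst e)) (hasNested || decide (pvPartRest e ≠ ""))
      | some c =>
        if pvPartFirst e ≠ c then ""
        else pvLoopA t (some c) (hasNested || decide (pvPartRest e ≠ ""))

def detect_root_prefix_py (namelist : List String) : String :=
  pvLoopA namelist none false

-- ===== PORT B =====
-- Source B's _lcp: walk zip(a, b), keeping characters while they agree, stop at the first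
-- mismatch (structural recursion over the two character lists; exact)
def pvLcpChars : List Char → List Char → List Char
  | x :: a, y :: b => if x = y then x :: pvLcpChars a b else []
  | _, _ => []

def pvLcp (a b : String) : String := String.ofList (pvLcpChars a.toList b.toList)

def detect_root_prefix_py_alt (namelist : List String) : String :=
  let entries := (namelist.filter (fun e => !PySem.Str.startswith e "__MACOSX")).map (fun e => e ++ "/")
  match entries with
  | [] => ""
  | h :: t =>
    let pre := t.foldl pvLcp h
    let root := pvPartFirst pre
    if '/' ∈ pre.toList then               -- 'if not sep: return ""' — sep nonempty iff '/' occurs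
      if entries.any (fun s => decide (s.toList.length > root.toList.length + 2)) then root ++ "/"
      else ""
    else ""

-- ===== PRECONDITION & SPEC =====
def Spec_detect_root_prefix_py (namelist : List String) (out : String) : Prop := out = detect_root_prefix_py_alt namelist
instance (namelist : List String) (out : String) : Decidable (Spec_detect_root_prefix_py namelist out) := by unfold Spec_detect_root_prefix_py; infer_instance

-- ===== CLAIM (what is proved, stated in full; the proofs are below) =====
def Claim_equal_detect_root_prefix_py : Prop := ∀ (namelist : List String), Dom_detect_root_prefix_py namelist → Spec_detect_root_prefix_py namelist (detect_root_prefix_py namelist)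

-- ===== LEMMAS AND PROOFS =====
-- common closed form both ports are reduced to: the non-__MACOSX entries must share
-- their first component and at least one must have a nonempty remainder
def pvSpecFn (l : List String) : String :=
  match l.filter (fun e => !PySem.Str.startswith e "__MACOSX") with
  | [] => ""
  | h :: t =>
    if (t.all (fun e => pvPartFirst e == pvPartFirst h)
        && (h :: t).any (fun e => decide (pvPartRest e ≠ ""))) then pvPartFirst h ++ "/" else ""

theorem loopA_some (l : List String) (c : String) (hn : Bool) :
    pvLoopA l (some c) hn =
      if ((l.filter (fun e => !PySem.Str.startswith e "__MACOSX")).all (fun e => pvPartFirst e == c)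
          && (hn || (l.filter (fun e => !PySem.Str.startswith e "__MACOSX")).any
                (fun e => decide (pvPartRest e ≠ "")))) = true
      then c ++ "/" else "" := by
  induction l generalizing hn with
  | nil => simp [pvLoopA]
  | cons e t ih =>
    cases hs : PySem.Str.startswith e "__MACOSX" with
    | true =>
      simp only [pvLoopA, List.filter_cons, hs]
      simp [ih]
    | false =>
      by_cases hf : pvPartFirst e = c
      · simp only [pvLoopA, List.filter_cons, hs]
        simp [hf, ih, or_assoc]
      · simp only [pvLoopA, List.filter_cons, hs]
        simp [hf]

theorem A_eq_spec (l : List String) : detect_root_prefix_py l = pvSpecFn l := by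
  induction l with
  | nil => rfl
  | cons e t ih =>
    cases hs : PySem.Str.startswith e "__MACOSX" with
    | true =>
      have h1 : detect_root_prefix_py (e :: t) = detect_root_prefix_py t := by
        simp only [detect_root_prefix_py, pvLoopA, hs]
        simp
      have h2 : pvSpecFn (e :: t) = pvSpecFn t := by
        simp only [pvSpecFn, List.filter_cons, hs]
        simp
      rw [h1, ih, h2]
    | false =>
      show pvLoopA (e :: t) none false = _
      simp only [pvLoopA, hs]
      rw [if_neg (by simp)]
      rw [loopA_some]
      simp only [pvSpecFn, List.filter_cons, hs]
      simp

theorem pvLcp_prefix_left : ∀ (a b : List Char), pvLcpChars a b <+: a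
  | [], _ => by simp [pvLcpChars]
  | _ :: _, [] => by simp [pvLcpChars]
  | x :: a, y :: b => by
    by_cases h : x = y
    · simpa [pvLcpChars, h, List.cons_prefix_cons] using pvLcp_prefix_left a b
    · simp [pvLcpChars, h]

theorem pvLcp_prefix_right : ∀ (a b : List Char), pvLcpChars a b <+: b
  | [], _ => by simp [pvLcpChars]
  | _ :: _, [] => by simp [pvLcpChars]
  | x :: a, y :: b => by
    by_cases h : x = y
    · simpa [pvLcpChars, h, List.cons_prefix_cons] using pvLcp_prefix_right a b
    · simp [pvLcpChars, h]

theorem prefix_pvLcp (c : List Char) : ∀ (a b : List Char), c <+: a → c <+: b → c <+: pvLcpChars a b := by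
  induction c with
  | nil => intro a b _ _; exact List.nil_prefix
  | cons x c ih =>
    intro a b ha hb
    obtain ⟨s, rfl⟩ := ha
    obtain ⟨u, hu⟩ := hb
    have hb' : b = x :: (c ++ u) := by simpa using hu.symm
    subst hb'
    have : c <+: pvLcpChars (c ++ s) (c ++ u) :=
      ih _ _ ⟨s, rfl⟩ ⟨u, rfl⟩
    simpa [pvLcpChars, List.cons_prefix_cons] using this

theorem foldP_prefix (t : List String) (h : String) :
    ((t.foldl pvLcp h).toList <+: h.toList) ∧ ∀ x ∈ t, (t.foldl pvLcp h).toList <+: x.toList := by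
  induction t generalizing h with
  | nil => exact ⟨List.prefix_refl _, by simp⟩
  | cons e t ih =>
    obtain ⟨h1, h2⟩ := ih (pvLcp h e)
    have hl : (pvLcp h e).toList = pvLcpChars h.toList e.toList := by simp [pvLcp]
    have hL : (pvLcp h e).toList <+: h.toList := by
      rw [hl]; exact pvLcp_prefix_left _ _
    have hR : (pvLcp h e).toList <+: e.toList := by
      rw [hl]; exact pvLcp_prefix_right _ _
    refine ⟨by simpa [List.foldl_cons] using h1.trans hL, ?_⟩
    intro x hx
    rcases List.mem_cons.mp hx with rfl | hx
    · simpa [List.foldl_cons] using h1.trans hR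
    · simpa [List.foldl_cons] using h2 x hx

theorem prefix_foldP (c : List Char) (t : List String) (h : String)
    (hh : c <+: h.toList) (ht : ∀ x ∈ t, c <+: x.toList) :
    c <+: (t.foldl pvLcp h).toList := by
  induction t generalizing h with
  | nil => simpa using hh
  | cons e t ih =>
    have hbase : c <+: (pvLcp h e).toList := by
      have := prefix_pvLcp c h.toList e.toList hh (ht e (by simp))
      simpa [pvLcp] using this
    simpa [List.foldl_cons] using ih (pvLcp h e) hbase (fun x hx => ht x (by simp [hx]))

-- takeWhile/dropWhile (≠ '/') facts
theorem dropWhile_pvQ_head : ∀ (l : List Char) (c : Char) (r : List Char),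
    l.dropWhile pvQ = c :: r → c = '/'
  | [], c, r => by intro h; simp at h
  | a :: l, c, r => by
    intro h
    by_cases ha : a = '/'
    · have hq : pvQ a = false := by simp [pvQ, ha]
      rw [List.dropWhile_cons, hq] at h
      simp at h
      rw [← h.1, ha]
    · have hq : pvQ a = true := by simp [pvQ, ha]
      rw [List.dropWhile_cons, hq] at h
      simp at h
      exact dropWhile_pvQ_head l c r h

theorem tw_append_slash (l : List Char) :
    (l ++ ['/']).takeWhile pvQ = l.takeWhile pvQ := by
  induction l with
  | nil =>
    have hq : pvQ '/' = false := by simp [pvQ]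
    simp [hq]
  | cons a l ih =>
    by_cases h : a = '/'
    · have hq : pvQ a = false := by simp [pvQ, h]
      simp [hq]
    · have hq : pvQ a = true := by simp [pvQ, h]
      simp [hq, ih]

theorem tw_no_slash (l : List Char) (a : Char)
    (h : a ∈ l.takeWhile pvQ) : a ≠ '/' := by
  have := List.mem_takeWhile_imp h
  simpa [pvQ] using this

theorem tw_of_no_slash (f z : List Char) (hf : ∀ c ∈ f, c ≠ '/') :
    (f ++ '/' :: z).takeWhile pvQ = f := by
  induction f with
  | nil =>
    have hq : pvQ '/' = false := by simp [pvQ]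
    simp [hq]
  | cons a f ih =>
    have hq : pvQ a = true := by simp [pvQ, hf a (by simp)]
    simp [hq, ih (fun c hc => hf c (by simp [hc]))]

theorem slash_split (l : List Char) (h : '/' ∈ l) :
    ∃ w, l = l.takeWhile pvQ ++ '/' :: w := by
  rcases hd : l.dropWhile pvQ with _ | ⟨c, r⟩
  · exfalso
    have hl : l.takeWhile pvQ = l := by
      have h2 := List.takeWhile_append_dropWhile (p := pvQ) (l := l)
      rw [hd] at h2; simpa using h2
    exact tw_no_slash l '/' (by rw [hl]; exact h) rfl
  · have hc : c = '/' := dropWhile_pvQ_head l c r hd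
    refine ⟨r, ?_⟩
    have h2 := List.takeWhile_append_dropWhile (p := pvQ) (l := l)
    rw [hd, hc] at h2
    exact h2.symm

theorem tw_of_prefix (q0 w s : List Char) (hq : ∀ c ∈ q0, c ≠ '/')
    (h : q0 ++ '/' :: w <+: s) : s.takeWhile pvQ = q0 := by
  obtain ⟨u, rfl⟩ := h
  have h2 : q0 ++ '/' :: w ++ u = q0 ++ '/' :: (w ++ u) := by simp
  rw [h2, tw_of_no_slash q0 (w ++ u) hq]

theorem ofList_eq_iff (a b : List Char) : String.ofList a = String.ofList b ↔ a = b := by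
  constructor
  · intro h; have := congrArg String.toList h; simpa using this
  · rintro rfl; rfl

-- per-entry structure: the entry is its first component, optionally followed by '/' and the rest
theorem entry_structure (e : String) :
    e.toList = e.toList.takeWhile pvQ ∧ pvPartRest e = "" ∨
    ∃ r, e.toList = e.toList.takeWhile pvQ ++ '/' :: r ∧ pvPartRest e = String.ofList r := by
  rcases hd : e.toList.dropWhile pvQ with _ | ⟨c, r⟩
  · left
    constructor
    · have h2 := List.takeWhile_append_dropWhile (p := pvQ) (l := e.toList)
      rw [hd] at h2; simpa using h2.symm
    · unfold pvPartRest
      rw [hd]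
      rfl
  · right
    have hc : c = '/' := dropWhile_pvQ_head e.toList c r hd
    refine ⟨r, ?_, ?_⟩
    · have h2 := List.takeWhile_append_dropWhile (p := pvQ) (l := e.toList)
      rw [hd, hc] at h2; exact h2.symm
    · unfold pvPartRest
      rw [hd]
      rfl

theorem toList_slash : ("/" : String).toList = ['/'] := rfl

theorem B_eq_spec (l : List String) : detect_root_prefix_py_alt l = pvSpecFn l := by
  rcases hrel : l.filter (fun e => !PySem.Str.startswith e "__MACOSX") with _ | ⟨h, t⟩
  · unfold detect_root_prefix_py_alt pvSpecFn
    rw [hrel]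
    simp
  · have htl : ∀ e : String, (e ++ "/").toList = e.toList ++ ['/'] := by
      intro e; simp [toList_slash]
    obtain ⟨hP1, hP2⟩ := foldP_prefix (t.map (fun e => e ++ "/")) (h ++ "/")
    set pre := (t.map (fun e => e ++ "/")).foldl pvLcp (h ++ "/") with hpre
    by_cases hall : ∀ e ∈ t, e.toList.takeWhile pvQ = h.toList.takeWhile pvQ
    · -- all first components agree: the lcp reaches past the first '/'
      set f := h.toList.takeWhile pvQ with hf
      have hfno : ∀ c ∈ f, c ≠ '/' := fun c hc => tw_no_slash _ c hc
      have hcommon : ∀ e : String, e.toList.takeWhile pvQ = f →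
          f ++ ['/'] <+: e.toList ++ ['/'] := by
        intro e he
        rcases entry_structure e with ⟨h1, _⟩ | ⟨r, h1, _⟩
        · rw [h1, he]
        · rw [h1, he]; exact ⟨r ++ ['/'], by simp⟩
      have hPpre : f ++ ['/'] <+: pre.toList := by
        apply prefix_foldP
        · rw [htl]; exact hcommon h hf.symm
        · intro x hx
          obtain ⟨e, he, rfl⟩ := List.mem_map.mp hx
          rw [htl]; exact hcommon e (hall e he)
      obtain ⟨w, hw⟩ := hPpre
      have hwP : pre.toList = f ++ '/' :: w := by rw [← hw]; simp
      have hmem : '/' ∈ pre.toList := by rw [hwP]; simp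
      have hroot : pvPartFirst pre = pvPartFirst h := by
        unfold pvPartFirst
        rw [hwP, tw_of_no_slash f w hfno, hf]
      have hrootlen : (pvPartFirst h).toList.length = f.length := by
        unfold pvPartFirst
        simp
        rw [← hf]
      have hlen : ∀ e : String, e.toList.takeWhile pvQ = f →
          (decide (e.toList.length + 1 > f.length + 2)) = decide (pvPartRest e ≠ "") := by
        intro e he
        rcases entry_structure e with ⟨h1, h2⟩ | ⟨r, h1, h2⟩
        · have hL : e.toList.length = f.length := by rw [h1, he]
          rw [h2, decide_eq_decide]
          exact iff_of_false (by omega) (by simp)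
        · rcases r with _ | ⟨c, r⟩
          · have hL : e.toList.length = f.length + 1 := by
              rw [h1, he]; simp
            rw [h2, decide_eq_decide]
            exact iff_of_false (by omega) (by simp)
          · have hL : e.toList.length = f.length + 1 + (r.length + 1) := by
              rw [h1, he]; simp only [List.length_append, List.length_cons]; omega
            have hne : String.ofList (c :: r) ≠ "" := by
              intro hx; have := congrArg String.toList hx; simp at this
            rw [h2, decide_eq_decide]
            exact iff_of_true (by omega) hne
      have hallb : t.all (fun e => pvPartFirst e == pvPartFirst h) = true := by
        simp only [List.all_eq_true, beq_iff_eq]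
        intro e he
        unfold pvPartFirst
        rw [ofList_eq_iff, hall e he, hf]
      have hany : ((h ++ "/") :: t.map (fun e => e ++ "/")).any
            (fun s => decide (s.toList.length > (pvPartFirst h).toList.length + 2))
          = (h :: t).any (fun e => decide (pvPartRest e ≠ "")) := by
        rw [show ((h ++ "/") :: t.map (fun e => e ++ "/")) = (h :: t).map (fun e => e ++ "/") from by simp]
        rw [List.any_map]
        apply PySem.List.any_congr_mem
        intro e he
        have he' : e.toList.takeWhile pvQ = f := by
          rcases List.mem_cons.mp he with rfl | he2
          · exact hf.symm
          · exact hall e he2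
        have h3 := hlen e he'
        simp only [Function.comp_apply, htl e, List.length_append, List.length_cons,
          List.length_nil, hrootlen]
        exact h3
      unfold detect_root_prefix_py_alt pvSpecFn
      rw [hrel]
      simp only [List.map_cons]
      rw [← hpre]
      rw [if_pos hmem, hroot]
      simp only [hany, hallb]
      simp
    · -- some first component differs: the lcp cannot contain '/'
      have hex : ∃ e ∈ t, e.toList.takeWhile pvQ ≠ h.toList.takeWhile pvQ := by
        by_contra hc
        apply hall
        intro e he
        by_contra hne
        exact hc ⟨e, he, hne⟩
      obtain ⟨e0, he0, hne0⟩ := hex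
      have hnomem : '/' ∉ pre.toList := by
        intro hmem
        obtain ⟨w, hw⟩ := slash_split pre.toList hmem
        set q0 := pre.toList.takeWhile pvQ with hq0
        have hqno : ∀ c ∈ q0, c ≠ '/' := fun c hc => tw_no_slash _ c hc
        have hfirst : ∀ e : String, pre.toList <+: e.toList ++ ['/'] →
            e.toList.takeWhile pvQ = q0 := by
          intro e hp
          have hp2 : q0 ++ '/' :: w <+: e.toList ++ ['/'] := by rw [← hw]; exact hp
          have h4 := tw_of_prefix q0 w _ hqno hp2
          rwa [tw_append_slash] at h4
        have hh0 : h.toList.takeWhile pvQ = q0 := by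
          apply hfirst h; rw [← htl h]; exact hP1
        have he0' : e0.toList.takeWhile pvQ = q0 := by
          apply hfirst e0
          rw [← htl e0]
          exact hP2 _ (List.mem_map.mpr ⟨e0, he0, rfl⟩)
        exact hne0 (by rw [he0', hh0])
      have hallb : t.all (fun e => pvPartFirst e == pvPartFirst h) = false := by
        simp only [List.all_eq_false]
        refine ⟨e0, he0, ?_⟩
        simp only [beq_iff_eq]
        unfold pvPartFirst
        intro hx
        exact hne0 ((ofList_eq_iff _ _).mp hx)
      unfold detect_root_prefix_py_alt pvSpecFn
      rw [hrel]
      simp only [List.map_cons]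
      rw [← hpre]
      rw [if_neg hnomem]
      simp only [hallb]
      simp

-- ===== VERDICT (by name: the statement is the Claim_ definition above) =====
theorem detect_root_prefix_py_spec : Claim_equal_detect_root_prefix_py := by
  intro namelist _
  unfold Spec_detect_root_prefix_py
  rw [A_eq_spec, B_eq_spec]
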